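-- pv_equiv track=rewrite | github.com/niklasweimann/Daily-Code-Problem | Day 1 - Day 100/Day 76/Day76.py | get_unordered_colums
-- ===== SOURCE A (Python) =====
-- def get_unordered_colums(data):
--     res = 0
--     for i in range(0, len(data[0])):
--         for j in range(0, len(data)-1):
--             if data[j][i] > data[j + 1][i]:
--                 res += 1
--                 break
--     return res
-- ===== SOURCE B (Python) =====
-- def get_unordered_colums(data):
--     res = 0
--     for i in range(len(data[0])):
--         col = [data[j][i] for j in range(len(data))]
--         if col != sorted(col):
--             res += 1
--     return res
-- ===== Notes on version B (the rewrite author's own statement) =====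
-- stated objective: simpler
-- what changed: Replaces A's early-exit adjacent-pair inversion scan per column with building each column and testing it against its sorted copy.
-- outside the precondition, e.g. on get_unordered_colums([[2, 2], [1, 1], [9]]): A returns 2, B raises IndexError
import Mathlib
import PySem

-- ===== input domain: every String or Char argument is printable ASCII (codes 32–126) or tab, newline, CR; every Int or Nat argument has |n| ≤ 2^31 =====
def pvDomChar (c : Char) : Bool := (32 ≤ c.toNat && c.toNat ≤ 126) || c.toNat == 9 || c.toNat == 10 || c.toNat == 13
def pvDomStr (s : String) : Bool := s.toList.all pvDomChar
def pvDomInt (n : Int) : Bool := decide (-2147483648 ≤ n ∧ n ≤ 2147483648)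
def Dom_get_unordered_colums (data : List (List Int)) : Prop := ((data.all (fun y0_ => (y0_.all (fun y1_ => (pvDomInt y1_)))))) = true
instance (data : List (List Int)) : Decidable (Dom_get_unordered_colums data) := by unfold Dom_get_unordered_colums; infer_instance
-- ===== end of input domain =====

-- B replaces A's early-exit adjacent-pair inversion scan per column with a
-- sort-and-compare sortedness test (simpler, same asymptotics up to a log factor).

-- ===== PORT A =====
-- data[j][i] as A writes it (exact under Pre_, where both indices are in range)
def pvGetA (data : List (List Int)) (i j : Int) : Int :=
  PySem.List.pyGetD (PySem.List.pyGetD data j []) i 0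

-- inner 'for j in range(0, len(data)-1): … break' as structural recursion over the range list
def pvInnerA (data : List (List Int)) (i : Int) : List Int → Bool
  | [] => false
  | j :: js => if pvGetA data i j > pvGetA data i (j + 1) then true else pvInnerA data i js

def get_unordered_colums (data : List (List Int)) : Int :=
  (PySem.List.pyRange 0 ((PySem.List.pyGetD data 0 []).length : Int) 1).foldl
    (fun res i =>
      if pvInnerA data i (PySem.List.pyRange 0 ((data.length : Int) - 1) 1) then res + 1 else res)
    0

-- ===== PORT B =====
def get_unordered_colums_alt (data : List (List Int)) : Int :=
  (PySem.List.pyRange 0 ((PySem.List.pyGetD data 0 []).length : Int) 1).foldl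
    (fun res i =>
      let col := (PySem.List.pyRange 0 ((data.length : Int)) 1).map
        (fun j => PySem.List.pyGetD (PySem.List.pyGetD data j []) i 0)
      if col ≠ PySem.List.sorted col (fun x => x) false then res + 1 else res)
    0

-- ===== PRECONDITION & SPEC =====
-- Pre_ excludes empty data (A raises IndexError) and ragged inputs with a row shorter than
-- the first row: there A may return only thanks to its early break while B raises IndexError.
def Pre_get_unordered_colums (data : List (List Int)) : Prop :=
  data ≠ [] ∧ ∀ row ∈ data, (data.headD []).length ≤ row.length
instance (data : List (List Int)) : Decidable (Pre_get_unordered_colums data) := by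
  unfold Pre_get_unordered_colums; infer_instance
def pvWitness_get_unordered_colums : List (List Int) := [[1, 2], [3, 0]]

def Spec_get_unordered_colums (data : List (List Int)) (out : Int) : Prop := out = get_unordered_colums_alt data
instance (data : List (List Int)) (out : Int) : Decidable (Spec_get_unordered_colums data out) := by unfold Spec_get_unordered_colums; infer_instance

-- ===== CLAIM (what is proved, stated in full; the proofs are below) =====
def Claim_equal_get_unordered_colums : Prop := ∀ (data : List (List Int)), Dom_get_unordered_colums data → Pre_get_unordered_colums data → Spec_get_unordered_colums data (get_unordered_colums data)

-- ===== LEMMAS AND PROOFS =====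

-- A's inner scan finds an adjacent inversion somewhere in the list of row indices
theorem pvInnerA_eq_true_iff (data : List (List Int)) (i : Int) (L : List Int) :
    pvInnerA data i L = true ↔ ∃ j ∈ L, pvGetA data i (j + 1) < pvGetA data i j := by
  induction L with
  | nil => simp [pvInnerA]
  | cons j js ih =>
    by_cases h : pvGetA data i (j + 1) < pvGetA data i j
    · simp [pvInnerA, h]
    · simp [pvInnerA, ih, h]

-- a chain over range(a, b) is exactly the adjacent condition on indices
theorem isChain_pyRange_iff (S : Int → Int → Prop) (a b : Int) :
    (PySem.List.pyRange a b 1).IsChain S ↔ ∀ j, a ≤ j → j + 1 < b → S j (j + 1) := by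
  by_cases hab : b ≤ a
  · rw [PySem.List.pyRange_one_eq_nil hab]
    constructor
    · intro _ j hj hj'; omega
    · intro _; exact List.isChain_nil
  · push Not at hab
    obtain ⟨n, hn⟩ : ∃ n : Nat, b - a = (n : Int) + 1 := ⟨(b - a - 1).toNat, by omega⟩
    induction n generalizing a with
    | zero =>
      have : b = a + 1 := by omega
      subst this
      rw [PySem.List.pyRange_one_cons (by omega), PySem.List.pyRange_one_eq_nil (by omega)]
      constructor
      · intro _ j hj hj'; omega
      · intro _; exact List.isChain_singleton _
    | succ n ih =>
      rw [PySem.List.pyRange_one_cons (by omega),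
          PySem.List.pyRange_one_cons (by omega)]
      rw [List.isChain_cons_cons]
      rw [← PySem.List.pyRange_one_cons (show a + 1 < b by omega)]
      rw [ih (a + 1) (by omega) (by omega)]
      constructor
      · rintro ⟨hS, hrest⟩ j hj hj'
        rcases eq_or_lt_of_le hj with rfl | hlt
        · exact hS
        · exact hrest j (by omega) hj'
      · intro h
        exact ⟨h a le_rfl (by omega), fun j hj hj' => h j (by omega) hj'⟩

-- a list equals its Python sort iff it is pairwise nondecreasing
theorem eq_sorted_iff_pairwise (l : List Int) :
    l = PySem.List.sorted l (fun x => x) false ↔ l.Pairwise (· ≤ ·) := by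
  constructor
  · intro h
    have := PySem.List.sorted_pairwise l (fun x => x)
    rw [← h] at this
    exact this
  · intro h
    exact (PySem.List.sorted_eq_self_of_pairwise l (fun x => x) h).symm

-- per-column equivalence of the two tests
theorem column_test_iff (data : List (List Int)) (i : Int) :
    (pvInnerA data i (PySem.List.pyRange 0 ((data.length : Int) - 1) 1) = true) ↔
      ((PySem.List.pyRange 0 ((data.length : Int)) 1).map
        (fun j => PySem.List.pyGetD (PySem.List.pyGetD data j []) i 0) ≠
       PySem.List.sorted ((PySem.List.pyRange 0 ((data.length : Int)) 1).map
        (fun j => PySem.List.pyGetD (PySem.List.pyGetD data j []) i 0)) (fun x => x) false) := by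
  set g : Int → Int := fun j => PySem.List.pyGetD (PySem.List.pyGetD data j []) i 0 with hg
  have hcol : ((PySem.List.pyRange 0 ((data.length : Int)) 1).map g).Pairwise (· ≤ ·) ↔
      ∀ j, 0 ≤ j → j + 1 < (data.length : Int) → g j ≤ g (j + 1) := by
    rw [← List.isChain_iff_pairwise, List.isChain_map g, isChain_pyRange_iff]
  rw [pvInnerA_eq_true_iff, Ne, eq_sorted_iff_pairwise, hcol]
  push Not
  constructor
  · rintro ⟨j, hj, hlt⟩
    rw [PySem.List.mem_pyRange_one] at hj
    exact ⟨j, hj.1, by omega, by simpa [hg, pvGetA] using hlt⟩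
  · rintro ⟨j, h0, h1, hlt⟩
    refine ⟨j, ?_, ?_⟩
    · rw [PySem.List.mem_pyRange_one]; omega
    · simpa [hg, pvGetA] using lt_of_not_ge (by simpa using hlt)

-- ===== VERDICT (by name: the statement is the Claim_ definition above) =====
theorem get_unordered_colums_spec : Claim_equal_get_unordered_colums := by
  intro data _ _
  unfold Spec_get_unordered_colums get_unordered_colums get_unordered_colums_alt
  apply PySem.List.foldl_congr_mem
  intro res i _
  rcases iff_iff_and_or_not_and_not.mp (column_test_iff data i) with ⟨h1, h2⟩ | ⟨h1, h2⟩
  · rw [if_pos h1, if_pos h2]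
  · rw [if_neg (by simpa using h1), if_neg (by simpa using h2)]
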